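-- pv_equiv track=rewrite | github.com/alanxie1999/YdxbotV2 | market_broadcast_alert/market_broadcast_alert.py | get_current_streak
-- ===== SOURCE A (Python) =====
-- from typing import Any, Dict, Iterable, List, Optional
--
-- def get_current_streak(history: List[int]) -> tuple[int, int]:
--     if not history:
--         return 0, -1
--     tail = int(history[-1])
--     streak = 1
--     for value in reversed(history[:-1]):
--         if int(value) == tail:
--             streak += 1
--         else:
--             break
--     return streak, tail
-- ===== SOURCE B (Python) =====
-- from itertools import groupby
--
-- def get_current_streak(history):
--     runs = [(k, sum(1 for _ in g)) for k, g in groupby(int(v) for v in history)]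
--     if not runs:
--         return 0, -1
--     k, n = runs[-1]
--     return n, k
-- ===== Notes on version B (the rewrite author's own statement) =====
-- stated objective: idiomatic
-- what changed: B groups the whole list into runs of consecutive equal values with itertools.groupby and reads off the last run, instead of A's backward counting loop with a break over reversed(history[:-1]).
import Mathlib
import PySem

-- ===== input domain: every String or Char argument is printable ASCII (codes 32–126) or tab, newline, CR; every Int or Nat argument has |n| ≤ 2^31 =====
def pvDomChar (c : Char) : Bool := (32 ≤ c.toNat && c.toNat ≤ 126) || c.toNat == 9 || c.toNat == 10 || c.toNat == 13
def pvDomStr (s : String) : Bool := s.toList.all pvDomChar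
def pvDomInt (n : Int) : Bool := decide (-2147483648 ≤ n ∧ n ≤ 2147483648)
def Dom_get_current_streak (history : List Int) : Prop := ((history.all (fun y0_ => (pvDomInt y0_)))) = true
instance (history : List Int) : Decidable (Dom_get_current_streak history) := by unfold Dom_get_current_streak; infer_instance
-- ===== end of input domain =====

-- B replaces A's backward counting loop with grouping the list into runs of
-- consecutive equal values and reading off the last run (idiomatic, same cost).

-- ===== PORT A =====
-- A's for-loop over reversed(history[:-1]) with a break: structural recursion
-- that stops at the first value different from tail.
def gcsLoop (tail : Int) (streak : Int) : List Int → Int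
  | [] => streak
  | v :: rest => if v == tail then gcsLoop tail (streak + 1) rest else streak

def get_current_streak (history : List Int) : Int × Int :=
  match history.getLast? with
  | none => (0, -1)                 -- `if not history: return 0, -1`
  | some tail => (gcsLoop tail 1 history.dropLast.reverse, tail)

-- ===== PORT B =====
-- Source B's groupby: the list of (key, run length) for maximal runs of
-- consecutive equal values, built front-to-back by recursion.
def gcsRuns : List Int → List (Int × Int)
  | [] => []
  | v :: rest =>
    match gcsRuns rest with
    | [] => [(v, 1)]
    | (k, n) :: t => if v == k then (k, n + 1) :: t else (v, 1) :: (k, n) :: t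

def get_current_streak_alt (history : List Int) : Int × Int :=
  match (gcsRuns history).getLast? with
  | none => (0, -1)
  | some (k, n) => (n, k)

-- ===== PRECONDITION & SPEC =====
def Spec_get_current_streak (history : List Int) (out : Int × Int) : Prop := out = get_current_streak_alt history
instance (history : List Int) (out : Int × Int) : Decidable (Spec_get_current_streak history out) := by unfold Spec_get_current_streak; infer_instance

-- ===== CLAIM (what is proved, stated in full; the proofs are below) =====
def Claim_equal_get_current_streak : Prop := ∀ (history : List Int), Dom_get_current_streak history → Spec_get_current_streak history (get_current_streak history)

-- ===== LEMMAS AND PROOFS =====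

-- A's loop counts the leading run of `tail`s of its argument.
theorem gcsLoop_eq (tail : Int) (l : List Int) : ∀ s, gcsLoop tail s l = s + ((l.takeWhile (· == tail)).length : Int) := by
  induction l with
  | nil => intro s; simp [gcsLoop]
  | cons v rest ih =>
    intro s
    by_cases h : v = tail
    · simp [gcsLoop, h, ih]; ring
    · simp [gcsLoop, h]

-- gcsRuns of a nonempty list is nonempty.
theorem gcsRuns_ne_nil (v : Int) (rest : List Int) : gcsRuns (v :: rest) ≠ [] := by
  cases h : gcsRuns rest with
  | nil => simp [gcsRuns, h]
  | cons p t =>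
    obtain ⟨k, n⟩ := p
    by_cases hv : v = k <;> simp [gcsRuns, h, hv]

-- Structure of gcsRuns on a cons: the first run, then the runs of the remainder.
theorem gcsRuns_cons (rest : List Int) : ∀ v : Int, gcsRuns (v :: rest) = (v, 1 + ((rest.takeWhile (· == v)).length : Int)) :: gcsRuns (rest.dropWhile (· == v)) := by
  induction rest with
  | nil => intro v; simp [gcsRuns]
  | cons w rs ih =>
    intro v
    by_cases h : v = w
    · subst h
      change (match gcsRuns (v :: rs) with
        | [] => [(v, 1)]
        | (k, n) :: t => if v == k then (k, n + 1) :: t else (v, 1) :: (k, n) :: t) = _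
      rw [ih v]
      simp only [BEq.rfl, if_true]
      rw [List.takeWhile_cons_of_pos (by simp), List.dropWhile_cons_of_pos (by simp),
        List.length_cons]
      congr 2
    · have hb : (v == w) = false := by simp [h]
      change (match gcsRuns (w :: rs) with
        | [] => [(v, 1)]
        | (k, n) :: t => if v == k then (k, n + 1) :: t else (v, 1) :: (k, n) :: t) = _
      rw [ih w]
      simp only [hb, Bool.false_eq_true, if_false]
      rw [List.takeWhile_cons_of_neg (by simpa using Ne.symm h), List.dropWhile_cons_of_neg (by simpa using Ne.symm h),
        ih w]
      simp

-- takeWhile ignores a suffix when it already stops inside the prefix, or when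
-- every element of the suffix fails the predicate.
theorem takeWhile_append_stop (p : Int → Bool) (junk : List Int) : ∀ m : List Int, (List.takeWhile p m ≠ m ∨ ∀ x ∈ junk, ¬ p x) → List.takeWhile p (m ++ junk) = List.takeWhile p m := by
  intro m
  induction m with
  | nil =>
    intro h
    rcases h with h | h
    · simp at h
    · simp only [List.nil_append, List.takeWhile_nil]
      cases junk with
      | nil => simp
      | cons a t =>
        have := h a (by simp)
        simp [this]
  | cons a m' ih =>
    intro h
    by_cases ha : p a
    · simp only [List.cons_append, List.takeWhile_cons, ha, if_true]
      rw [ih]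
      rcases h with h | h
      · left; intro hc; apply h; simp [ha, hc]
      · right; exact h
    · simp [ha]

-- All elements of the leading run equal v.
theorem mem_takeWhile_eq (v : Int) (rest : List Int) (x : Int) (hx : x ∈ rest.takeWhile (· == v)) : x = v := by
  have := List.mem_takeWhile_imp hx
  simpa using this

-- The head of a dropWhile residue fails the predicate.
theorem dropWhile_head_false (p : Int → Bool) : ∀ (l : List Int) (a : Int) (t : List Int), l.dropWhile p = a :: t → p a = false := by
  intro l
  induction l with
  | nil => intro a t h; simp at h
  | cons x xs ih =>
    intro a t h
    by_cases hx : p x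
    · exact ih a t (by simpa [List.dropWhile_cons, hx] using h)
    · rw [List.dropWhile_cons_of_neg (by simpa using hx)] at h
      have hxa : x = a := (List.cons.injEq x xs a t).mp h |>.1
      rw [← hxa]
      simpa using hx

-- getLast? skips a head when the tail is nonempty.
theorem getLast?_cons_ne_nil {α : Type} (a : α) (l : List α) (h : l ≠ []) : (a :: l).getLast? = l.getLast? := by
  cases l with
  | nil => exact absurd rfl h
  | cons b t => exact List.getLast?_cons_cons

-- Main equivalence, by strong induction on length (the recursion descends to
-- the list after the leading run).
theorem gcs_main : ∀ (N : Nat) (l : List Int), l.length ≤ N → get_current_streak l = get_current_streak_alt l := by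
  intro N
  induction N with
  | zero =>
    intro l hl
    have : l = [] := List.length_eq_zero_iff.mp (Nat.le_zero.mp hl)
    subst this
    rfl
  | succ n ih =>
    intro l hl
    cases l with
    | nil => rfl
    | cons v rest =>
      have hsplit : rest.takeWhile (· == v) ++ rest.dropWhile (· == v) = rest := List.takeWhile_append_dropWhile
      by_cases hse : rest.dropWhile (· == v) = []
      · -- the whole list is one run of v
        have htw : rest.takeWhile (· == v) = rest := by
          conv_rhs => rw [← hsplit]
          rw [hse, List.append_nil]
        have hall : ∀ x ∈ rest, x = v := by
          intro x hx
          apply mem_takeWhile_eq v rest x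
          rw [htw]
          exact hx
        have hallc : ∀ x ∈ (v :: rest), x = v := by
          intro x hx
          rcases List.mem_cons.mp hx with h | h
          · exact h
          · exact hall x h
        have hne : (v :: rest) ≠ [] := by simp
        have hlast : (v :: rest).getLast? = some v := by
          rw [List.getLast?_eq_some_getLast hne, hallc _ (List.getLast_mem hne)]
        have hdl : ∀ x ∈ (v :: rest).dropLast.reverse, (x == v) = true := by
          intro x hx
          have : x ∈ (v :: rest) := List.dropLast_sublist _ |>.mem (List.mem_reverse.mp hx)
          simp [hallc x this]
        have htwdl : ((v :: rest).dropLast.reverse).takeWhile (· == v) = (v :: rest).dropLast.reverse :=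
          List.takeWhile_eq_self_iff.mpr hdl
        have hruns : gcsRuns (v :: rest) = [(v, 1 + (rest.length : Int))] := by
          rw [gcsRuns_cons, htw, hse]
          rfl
        simp only [get_current_streak, get_current_streak_alt, hlast, hruns,
          gcsLoop_eq, htwdl]
        simp [List.length_dropLast]
      · -- the list splits as a run of v followed by a nonempty remainder s
        cases hsc : rest.dropWhile (· == v) with
        | nil => exact absurd hsc hse
        | cons a t =>
          have hlen : (a :: t).length ≤ n := by
            have h1 := List.length_dropWhile_le (fun x => x == v) rest
            rw [hsc] at h1
            have h2 : rest.length ≤ n := by simpa using Nat.succ_le_succ_iff.mp (by simpa using hl)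
            omega
          have ihs := ih (a :: t) hlen
          have hav : (a == v) = false := dropWhile_head_false _ rest a t hsc
          -- B side: last run of (v :: rest) is the last run of a :: t
          have hBside : get_current_streak_alt (v :: rest) = get_current_streak_alt (a :: t) := by
            have h1 : gcsRuns (v :: rest) = (v, 1 + ((rest.takeWhile (· == v)).length : Int)) :: gcsRuns (a :: t) := by
              rw [gcsRuns_cons, hsc]
            have h2 : (gcsRuns (v :: rest)).getLast? = (gcsRuns (a :: t)).getLast? := by
              rw [h1]
              exact getLast?_cons_ne_nil _ _ (gcsRuns_ne_nil a t)
            simp only [get_current_streak_alt, h2]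
          -- A side: the trailing run of (v :: rest) is the trailing run of a :: t
          have hAside : get_current_streak (v :: rest) = get_current_streak (a :: t) := by
            have hdecomp : (v :: rest) = (v :: rest.takeWhile (· == v)) ++ (a :: t) := by
              simp [← hsc, hsplit]
            have hne : (a :: t) ≠ ([] : List Int) := by simp
            have hlastq : (v :: rest).getLast? = (a :: t).getLast? := by
              rw [hdecomp, List.getLast?_append, List.getLast?_cons, Option.some_or]
            cases hgl : (a :: t).getLast? with
            | none => simp at hgl
            | some tl =>
              have hdlr : (v :: rest).dropLast.reverse = (a :: t).dropLast.reverse ++ (v :: rest.takeWhile (· == v)).reverse := by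
                conv_lhs => rw [hdecomp]
                rw [List.dropLast_append_of_ne_nil hne, List.reverse_append]
              have hjunk : ∀ x ∈ (v :: rest.takeWhile (· == v)).reverse, x = v := by
                intro x hx
                rcases List.mem_cons.mp (List.mem_reverse.mp hx) with h | h
                · exact h
                · exact mem_takeWhile_eq v rest x h
              have htwkey : List.takeWhile (· == tl) ((v :: rest).dropLast.reverse) = List.takeWhile (· == tl) ((a :: t).dropLast.reverse) := by
                rw [hdlr]
                apply takeWhile_append_stop
                by_cases hvt : v = tl
                · -- then the takeWhile stops inside (a :: t).dropLast.reverse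
                  left
                  intro hc
                  have hall' : ∀ x ∈ (a :: t).dropLast.reverse, (x == tl) = true :=
                    List.takeWhile_eq_self_iff.mp hc
                  have halls : ∀ x ∈ (a :: t), x = tl := by
                    intro x hx
                    have hcat := List.dropLast_concat_getLast hne
                    rw [← hcat] at hx
                    rcases List.mem_append.mp hx with h | h
                    · simpa using hall' x (List.mem_reverse.mpr h)
                    · have hx1 : x = (a :: t).getLast hne := by simpa using h
                      have hgl2 : (a :: t).getLast? = some ((a :: t).getLast hne) :=
                        List.getLast?_eq_some_getLast hne
                      rw [hgl] at hgl2
                      rw [hx1]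
                      exact (Option.some.inj hgl2).symm
                  have ha : a = tl := halls a (by simp)
                  rw [ha, ← hvt] at hav
                  simp at hav
                · right
                  intro x hx
                  rw [hjunk x hx]
                  simp [hvt]
              simp only [get_current_streak, hlastq, hgl, gcsLoop_eq, htwkey]
          rw [hAside, hBside, ihs]

-- ===== VERDICT (by name: the statement is the Claim_ definition above) =====
theorem get_current_streak_spec : Claim_equal_get_current_streak := by
  intro history _
  unfold Spec_get_current_streak
  exact gcs_main history.length history (le_refl _)
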